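-- pv_equiv track=rewrite | github.com/AlagappanRa/Personal-Projects | symmetrical_concentric_diamond_matrices.py | make_diamond_matrix
-- ===== SOURCE A (Python) =====
-- def make_diamond_matrix(m,n):
--     if n%2 == 0:
--         end_number = int(n/2)
--     else:
--         end_number = int(n//2) + 1
--
--     start_number = 0
--     output = []
--     if m%2 == 0:
--         rg = int(m/2)
--     else:
--         rg = int(m//2) + 1
--
--     for k in range(rg):
--         next_row = [i for i in range(start_number, end_number)] + [i for i in range(start_number, end_number - 1)][::-1]
--         start_number += 1
--         end_number += 1
--         output.append(next_row)
--
--     if m % 2 == 0: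
--         for i in output[::-1]:
--             output.append(i)
--         return output
--
--     else:
--         for index,i in enumerate(output[::-1]):
--             if index == 0:
--                 continue
--             else:
--                 output.append(i)
--
--         return output
-- ===== SOURCE B (Python) =====
-- def make_diamond_matrix(m, n):
--     ncols = max(n if n % 2 != 0 else n - 1, 0)
--     nrows = max(m, 0)
--     return [[min(i, nrows - 1 - i) + min(j, ncols - 1 - j) for j in range(ncols)]
--             for i in range(nrows)]
-- ===== Notes on version B (the rewrite author's own statement) =====
-- stated objective: simpler
-- what changed: Replaces the build-top-half-then-mirror loop with a single comprehension emitting each cell from the separable closed form min(i, nrows-1-i) + min(j, ncols-1-j).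
import Mathlib
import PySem

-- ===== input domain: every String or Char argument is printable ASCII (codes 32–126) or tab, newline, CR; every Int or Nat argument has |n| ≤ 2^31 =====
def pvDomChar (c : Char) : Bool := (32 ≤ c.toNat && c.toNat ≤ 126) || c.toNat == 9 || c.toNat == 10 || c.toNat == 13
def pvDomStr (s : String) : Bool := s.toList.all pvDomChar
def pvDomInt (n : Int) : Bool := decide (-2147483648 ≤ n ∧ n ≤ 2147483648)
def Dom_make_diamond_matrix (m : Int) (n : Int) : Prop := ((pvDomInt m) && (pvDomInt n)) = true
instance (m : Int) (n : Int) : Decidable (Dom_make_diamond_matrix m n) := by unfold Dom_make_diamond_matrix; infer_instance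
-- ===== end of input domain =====

-- B replaces A's build-top-half-then-mirror construction by one closed-form comprehension; objective: simpler.

-- ===== PORT A =====
-- literal transliteration of A; output[::-1] is ported as .reverse (PySem.List.slice?_none_none_neg_one),
-- int(n/2) / int(m/2) as PySem.Int.truncdiv (exact: the argument is even in that branch)
def make_diamond_matrix (m : Int) (n : Int) : List (List Int) :=
  let end_number : Int :=
    if PySem.Int.mod n 2 = 0 then PySem.Int.truncdiv n 2
    else PySem.Int.floordiv n 2 + 1
  let rg : Int :=
    if PySem.Int.mod m 2 = 0 then PySem.Int.truncdiv m 2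
    else PySem.Int.floordiv m 2 + 1
  let st := (PySem.List.pyRange 0 rg 1).foldl
    (fun (st : Int × Int × List (List Int)) _k =>
      let start_number := st.1
      let end_number := st.2.1
      let output := st.2.2
      let next_row := PySem.List.pyRange start_number end_number 1
        ++ (PySem.List.pyRange start_number (end_number - 1) 1).reverse
      (start_number + 1, end_number + 1, output ++ [next_row]))
    (0, end_number, [])
  let output := st.2.2
  if PySem.Int.mod m 2 = 0 then
    output.reverse.foldl (fun acc i => acc ++ [i]) output
  else
    (PySem.List.enumerate output.reverse).foldl
      (fun acc (p : Int × List Int) => if p.1 = 0 then acc else acc ++ [p.2]) output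

-- ===== PORT B =====
def make_diamond_matrix_alt (m : Int) (n : Int) : List (List Int) :=
  let ncols : Int := max (if PySem.Int.mod n 2 ≠ 0 then n else n - 1) 0
  let nrows : Int := max m 0
  (PySem.List.pyRange 0 nrows 1).map (fun i =>
    (PySem.List.pyRange 0 ncols 1).map (fun j =>
      min i (nrows - 1 - i) + min j (ncols - 1 - j)))

-- ===== PRECONDITION & SPEC =====
def Spec_make_diamond_matrix (m : Int) (n : Int) (out : List (List Int)) : Prop := out = make_diamond_matrix_alt m n
instance (m : Int) (n : Int) (out : List (List Int)) : Decidable (Spec_make_diamond_matrix m n out) := by unfold Spec_make_diamond_matrix; infer_instance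

-- ===== CLAIM (what is proved, stated in full; the proofs are below) =====
def Claim_equal_make_diamond_matrix : Prop := ∀ (m : Int) (n : Int), Dom_make_diamond_matrix m n → Spec_make_diamond_matrix m n (make_diamond_matrix m n)

-- ===== LEMMAS AND PROOFS =====

-- A's row built at step k (start_number = k, end_number = E + k)
def pvRowA (E k : Int) : List Int :=
  PySem.List.pyRange k (E + k) 1 ++ (PySem.List.pyRange k (E + k - 1) 1).reverse

-- B's row with vertical contribution v, over C columns
def pvRowB (C v : Int) : List Int :=
  (List.range C.toNat).map (fun (j : Nat) => v + min (j : Int) (C - 1 - (j : Int)))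

-- the top half built by A's loop, and B's whole matrix, as maps over List.range
def pvOut (E R : Int) : List (List Int) :=
  (List.range R.toNat).map (fun (k : Nat) => pvRowA E (k : Int))

def pvTarget (C N : Int) : List (List Int) :=
  (List.range N.toNat).map (fun (i : Nat) => pvRowB C (min (i : Int) (N - 1 - (i : Int))))

lemma pvLoopA (E : Int) (R : Nat) :
    (PySem.List.pyRange 0 (R : Int) 1).foldl
      (fun (st : Int × Int × List (List Int)) _k =>
        let start_number := st.1
        let end_number := st.2.1
        let output := st.2.2
        let next_row := PySem.List.pyRange start_number end_number 1
          ++ (PySem.List.pyRange start_number (end_number - 1) 1).reverse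
        (start_number + 1, end_number + 1, output ++ [next_row]))
      (0, E, [])
    = ((R : Int), E + R, (List.range R).map (fun (k : Nat) => pvRowA E (k : Int))) := by
  induction R with
  | zero => simp [PySem.List.pyRange_one_eq_nil]
  | succ r ih =>
    have hcast : ((r + 1 : Nat) : Int) = (r : Int) + 1 := by push_cast; ring
    rw [hcast, PySem.List.pyRange_one_succ_right (by positivity), List.foldl_append, ih]
    simp only [List.foldl_cons, List.foldl_nil, List.range_succ, List.map_append, List.map_cons,
      List.map_nil, Prod.mk.injEq]
    exact ⟨trivial, by ring, by simp [pvRowA]⟩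

lemma pvRowA_eq_rowB (E k : Int) : pvRowA E k = pvRowB (max (2 * E - 1) 0) k := by
  rcases le_or_gt E 0 with hE | hE
  · have h0 : max (2 * E - 1) 0 = 0 := by omega
    rw [h0]
    unfold pvRowA pvRowB
    rw [PySem.List.pyRange_one_eq_nil (by omega), PySem.List.pyRange_one_eq_nil (by omega)]
    simp
  · have hC : max (2 * E - 1) 0 = 2 * E - 1 := by omega
    rw [hC]
    unfold pvRowA pvRowB
    rw [PySem.List.pyRange_one, PySem.List.pyRange_one]
    apply List.ext_getElem
    · simp; omega
    · intro i h1 h2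
      simp only [List.length_append, List.length_map, List.length_reverse,
        List.length_range] at h1 h2
      by_cases hi : i < (E + k - k).toNat
      · rw [List.getElem_append_left (by simpa using hi)]
        simp only [List.getElem_map, List.getElem_range]
        omega
      · rw [List.getElem_append_right (by simpa using hi)]
        simp only [List.getElem_reverse, List.getElem_map, List.getElem_range,
          List.length_map, List.length_range]
        omega

lemma pvRevMap {α : Type} (f : Nat → α) (R : Nat) :
    ((List.range R).map f).reverse = (List.range R).map (fun t => f (R - 1 - t)) := by
  apply List.ext_getElem
  · simp
  · intro i h1 h2
    simp only [List.getElem_reverse, List.getElem_map, List.getElem_range, List.length_map,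
      List.length_range] at *

lemma pvEnumFold1 (xs init : List (List Int)) (s : Int) (hs : 1 ≤ s) :
    (PySem.List.enumerate xs s).foldl
      (fun acc (p : Int × List Int) => if p.1 = 0 then acc else acc ++ [p.2]) init
    = init ++ xs := by
  induction xs generalizing init s with
  | nil => simp [PySem.List.enumerate]
  | cons x xs ih =>
    rw [PySem.List.enumerate_cons, List.foldl_cons]
    simp only [if_neg (by omega : ¬ (s = 0))]
    rw [ih (init ++ [x]) (s+1) (by omega)]
    simp

lemma pvEnumFold (xs init : List (List Int)) :
    (PySem.List.enumerate xs).foldl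
      (fun acc (p : Int × List Int) => if p.1 = 0 then acc else acc ++ [p.2]) init
    = init ++ xs.tail := by
  cases xs with
  | nil => simp [PySem.List.enumerate]
  | cons x xs =>
    rw [PySem.List.enumerate_cons, List.foldl_cons]
    simp only [reduceIte]
    exact pvEnumFold1 xs init 1 le_rfl

-- the even-m mirror: top half followed by its reflection is B's matrix with 2R rows
lemma pvMirrorEven (E R : Int) :
    pvOut E R ++ (pvOut E R).reverse = pvTarget (max (2 * E - 1) 0) (max (2 * R) 0) := by
  unfold pvOut pvTarget
  simp only [pvRowA_eq_rowB]
  rw [pvRevMap, show (max (2 * R) 0).toNat = R.toNat + R.toNat from by omega, List.range_add,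
    List.map_append, List.map_map]
  congr 1
  · apply List.map_congr_left
    intro k hk
    rw [List.mem_range] at hk
    congr 1
    omega
  · apply List.map_congr_left
    intro t ht
    rw [List.mem_range] at ht
    simp only [Function.comp]
    congr 1
    omega

lemma pvTailMapRange {α : Type} (h : Nat → α) (s : Nat) :
    (List.map h (List.range (s + 1))).tail = List.map (fun t => h (t + 1)) (List.range s) := by
  rw [List.range_succ_eq_map, List.map_cons, List.tail_cons, List.map_map]
  rfl

-- the odd-m mirror: top half followed by its reflection minus the middle row
lemma pvMirrorOdd (E R : Int) :
    pvOut E R ++ ((pvOut E R).reverse).tail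
    = pvTarget (max (2 * E - 1) 0) (max (2 * R - 1) 0) := by
  unfold pvOut pvTarget
  simp only [pvRowA_eq_rowB]
  rcases Nat.eq_zero_or_pos R.toNat with h0 | hpos
  · rw [h0, show (max (2 * R - 1) 0).toNat = 0 from by omega]
    simp
  · obtain ⟨s, hs⟩ : ∃ s, R.toNat = s + 1 := ⟨R.toNat - 1, by omega⟩
    have hsplit : List.range ((s + 1) + s) = List.range (s + 1) ++ (List.range s).map ((s + 1) + ·) :=
      List.range_add
    rw [hs, pvRevMap, pvTailMapRange,
      show (max (2 * R - 1) 0).toNat = (s + 1) + s from by omega, hsplit,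
      List.map_append, List.map_map]
    congr 1
    · apply List.map_congr_left
      intro k hk
      rw [List.mem_range] at hk
      congr 1
      omega
    · apply List.map_congr_left
      intro t ht
      rw [List.mem_range] at ht
      simp only [Function.comp]
      congr 1
      omega

-- B as pvTarget
lemma pvAltEq (m n : Int) :
    make_diamond_matrix_alt m n
    = pvTarget (max (if PySem.Int.mod n 2 ≠ 0 then n else n - 1) 0) (max m 0) := by
  unfold make_diamond_matrix_alt pvTarget pvRowB
  simp only [PySem.List.pyRange_one, List.map_map, Function.comp_def, sub_zero, zero_add]

-- range over a nonnegative Int bound equals range over its toNat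
lemma pvRangeToNat (r : Int) :
    PySem.List.pyRange 0 r 1 = PySem.List.pyRange 0 ((r.toNat : Int)) 1 := by
  rcases le_or_gt r 0 with h | h
  · rw [PySem.List.pyRange_one_eq_nil h, PySem.List.pyRange_one_eq_nil (by omega)]
  · rw [Int.toNat_of_nonneg (by omega)]

-- ===== VERDICT (by name: the statement is the Claim_ definition above) =====
theorem make_diamond_matrix_spec : Claim_equal_make_diamond_matrix := by
  intro m n _
  unfold Spec_make_diamond_matrix make_diamond_matrix
  rw [pvAltEq]
  set E : Int := if PySem.Int.mod n 2 = 0 then PySem.Int.truncdiv n 2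
    else PySem.Int.floordiv n 2 + 1 with hEdef
  set rg : Int := if PySem.Int.mod m 2 = 0 then PySem.Int.truncdiv m 2
    else PySem.Int.floordiv m 2 + 1 with hRdef
  simp only []
  rw [pvRangeToNat, pvLoopA]
  -- the column count matches B's
  have hC : max (2 * E - 1) 0 = max (if PySem.Int.mod n 2 ≠ 0 then n else n - 1) 0 := by
    rcases PySem.Int.mod_two_eq n with h | h
    · obtain ⟨t, rfl⟩ : (2 : Int) ∣ n := (PySem.Int.mod_eq_zero_iff_dvd n 2).mp h
      rw [hEdef, if_pos h]
      simp only [h, ne_eq, not_true_eq_false, if_false]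
      have ht : PySem.Int.truncdiv (2 * t) 2 = t := by
        simp [PySem.Int.truncdiv]
      rw [ht]
    · have hfd := PySem.Int.floordiv_mul_add_mod n 2
      rw [h] at hfd
      rw [hEdef, if_neg (by omega)]
      simp only [h, ne_eq, if_pos (by omega : (1:Int) ≠ 0)]
      omega
  -- the row count matches B's
  rcases PySem.Int.mod_two_eq m with hm | hm
  · obtain ⟨t, rfl⟩ : (2 : Int) ∣ m := (PySem.Int.mod_eq_zero_iff_dvd m 2).mp hm
    have hrg : rg = t := by
      rw [hRdef, if_pos hm]
      simp [PySem.Int.truncdiv]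
    simp only [if_pos hm]
    rw [PySem.List.foldl_append_singleton]
    have := pvMirrorEven E rg
    rw [pvOut] at this
    rw [this, hC, hrg]
  · have hfd := PySem.Int.floordiv_mul_add_mod m 2
    rw [hm] at hfd
    have hrg : rg = PySem.Int.floordiv m 2 + 1 := by rw [hRdef, if_neg (by omega)]
    simp only [if_neg (by omega : ¬ PySem.Int.mod m 2 = 0)]
    rw [pvEnumFold]
    have := pvMirrorOdd E rg
    rw [pvOut] at this
    rw [this, hC]
    congr 1
    omega
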